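-- pv_equiv track=rewrite | github.com/Fondamenti18/fondamenti-di-programmazione | students/1753608/homework04/program01.py | _antenati
-- ===== SOURCE A (Python) =====
-- def _antenati(y,tree,children,new_tree,val):
--     for child in children:
--         len_figli = len(tree[child])
--         new_tree.update({child: val})
--         if(len_figli == y):
--             _antenati(y, tree, tree[child], new_tree, val + 1)
--         elif(len_figli != 0):
--             _antenati(y,tree,tree[child],new_tree,val)
--     return new_tree
-- ===== SOURCE B (Python) =====
-- def _antenati(y, tree, children, new_tree, val):
--     stack = [(children, val)]
--     while stack:
--         cs, v = stack.pop()
--         if not cs: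
--             continue
--         child = cs[0]
--         stack.append((cs[1:], v))
--         figli = tree[child]
--         new_tree[child] = v
--         if len(figli) == y:
--             stack.append((figli, v + 1))
--         elif len(figli) != 0:
--             stack.append((figli, v))
--     return new_tree
-- ===== Notes on version B (the rewrite author's own statement) =====
-- stated objective: alternative
-- what changed: A's recursive depth-first traversal is replaced by a single while-loop over an explicit LIFO stack of (children-list, value) frames that pops one child at a time, visiting nodes in the same order and building the same dict.
import Mathlib
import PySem

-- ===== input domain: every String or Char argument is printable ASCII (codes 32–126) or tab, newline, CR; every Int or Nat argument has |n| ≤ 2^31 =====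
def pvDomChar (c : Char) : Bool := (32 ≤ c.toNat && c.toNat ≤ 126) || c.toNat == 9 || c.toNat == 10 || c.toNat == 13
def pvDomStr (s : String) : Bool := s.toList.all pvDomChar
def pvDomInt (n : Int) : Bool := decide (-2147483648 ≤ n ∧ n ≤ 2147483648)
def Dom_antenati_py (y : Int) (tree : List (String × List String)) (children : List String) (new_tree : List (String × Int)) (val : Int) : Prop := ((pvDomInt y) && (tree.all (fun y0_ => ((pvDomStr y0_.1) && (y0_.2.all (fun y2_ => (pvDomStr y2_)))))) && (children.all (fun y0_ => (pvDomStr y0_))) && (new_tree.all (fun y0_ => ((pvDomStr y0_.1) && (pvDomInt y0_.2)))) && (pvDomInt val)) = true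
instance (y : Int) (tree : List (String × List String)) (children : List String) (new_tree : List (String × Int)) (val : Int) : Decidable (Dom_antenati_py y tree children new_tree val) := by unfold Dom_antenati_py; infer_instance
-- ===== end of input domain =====

-- B replaces A's recursion by one explicit-stack loop (same values, same mutation of new_tree,
-- equal returned dict); both Lean ports thread a fuel counter (a pure totality guard, consumed
-- only on descent and never exhausted on inputs satisfying Pre_).

-- ===== PORT A =====
-- A's recursion, fuel-threaded: the fuel (never exhausted on inputs satisfying Pre_) ticks once
-- per processed child; the pair's second component is the fuel left over.
def pvAntA (y : Int) (tree : PySem.Dict String (List String)) :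
    Nat → List String → PySem.Dict String Int → Int → PySem.Dict String Int × Nat
  | 0, _, nt, _ => (nt, 0)
  | f + 1, [], nt, _ => (nt, f + 1)
  | f + 1, c :: rest, nt, v =>
    let kids := (tree.get? c).getD []
    let nt1 := nt.insert c v
    if (kids.length : Int) = y then
      let r := pvAntA y tree f kids nt1 (v + 1)
      pvAntA y tree (min r.2 f) rest r.1 v
    else if (kids.length : Int) ≠ 0 then
      let r := pvAntA y tree f kids nt1 v
      pvAntA y tree (min r.2 f) rest r.1 v
    else
      pvAntA y tree f rest nt1 v
termination_by f _ _ _ => f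
decreasing_by
  all_goals first
    | exact Nat.lt_succ_self _
    | exact Nat.lt_succ_of_le (Nat.min_le_right _ _)

def antenati_py (y : Int) (tree : List (String × List String)) (children : List String) (new_tree : List (String × Int)) (val : Int) : List (String × Int) :=
  (pvAntA y (PySem.Dict.ofList tree)
    ((children.length + (tree.map (fun p => p.2.length)).sum + 2) ^ (tree.length + 2))
    children (PySem.Dict.ofList new_tree) val).1.items

-- ===== PORT B =====
-- B's while-loop over an explicit stack of (children-list, value) frames; same fuel guard.
def pvAntB (y : Int) (tree : PySem.Dict String (List String)) :
    Nat → List (List String × Int) → PySem.Dict String Int → PySem.Dict String Int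
  | _, [], nt => nt
  | f, ([], _) :: st, nt => pvAntB y tree f st nt
  | 0, (_ :: _, _) :: _, nt => nt
  | f + 1, (c :: rest, v) :: st, nt =>
    let kids := (tree.get? c).getD []
    let nt1 := nt.insert c v
    if (kids.length : Int) = y then
      pvAntB y tree f ((kids, v + 1) :: (rest, v) :: st) nt1
    else if (kids.length : Int) ≠ 0 then
      pvAntB y tree f ((kids, v) :: (rest, v) :: st) nt1
    else
      pvAntB y tree f ((rest, v) :: st) nt1
termination_by f st _ => (f, st.length)
decreasing_by
  all_goals first
    | exact Prod.Lex.right _ (Nat.lt_succ_self _)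
    | exact Prod.Lex.left _ _ (Nat.lt_succ_self _)

def antenati_py_alt (y : Int) (tree : List (String × List String)) (children : List String) (new_tree : List (String × Int)) (val : Int) : List (String × Int) :=
  (pvAntB y (PySem.Dict.ofList tree)
    ((children.length + (tree.map (fun p => p.2.length)).sum + 2) ^ (tree.length + 2))
    [(children, val)] (PySem.Dict.ofList new_tree)).items

-- ===== PRECONDITION & SPEC =====
-- one-step successors and a bounded transitive closure of the child graph (the iteration count
-- exceeds the number of distinct nodes, so the closure is complete)
def pvSucc (tree : List (String × List String)) (c : String) : List String :=
  ((PySem.Dict.ofList tree).get? c).getD []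
def pvStep (tree : List (String × List String)) (s : List String) : List String :=
  (s ++ s.flatMap (pvSucc tree)).dedup
def pvReach (tree : List (String × List String)) (s : List String) : List String :=
  (pvStep tree)^[tree.length + s.length + (tree.map (fun p => p.2.length)).sum + 1] s

-- Pre_ excludes exactly the inputs on which Python A raises: a node reachable from `children`
-- that is not a key of `tree` (KeyError), or a reachable cycle (unbounded recursion).
def Pre_antenati_py (y : Int) (tree : List (String × List String)) (children : List String) (new_tree : List (String × Int)) (val : Int) : Prop :=
  ∀ c ∈ pvReach tree children,
    ((PySem.Dict.ofList tree).get? c).isSome = true ∧ c ∉ pvReach tree (pvSucc tree c)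
instance (y : Int) (tree : List (String × List String)) (children : List String) (new_tree : List (String × Int)) (val : Int) : Decidable (Pre_antenati_py y tree children new_tree val) := by unfold Pre_antenati_py; infer_instance

def pvWitness_antenati_py : Int × (List (String × List String)) × List String × (List (String × Int)) × Int :=
  (1, [("a", ["b"]), ("b", [])], ["a"], [], 0)

def Spec_antenati_py (y : Int) (tree : List (String × List String)) (children : List String) (new_tree : List (String × Int)) (val : Int) (out : List (String × Int)) : Prop := out = antenati_py_alt y tree children new_tree val
instance (y : Int) (tree : List (String × List String)) (children : List String) (new_tree : List (String × Int)) (val : Int) (out : List (String × Int)) : Decidable (Spec_antenati_py y tree children new_tree val out) := by unfold Spec_antenati_py; infer_instance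

-- ===== CLAIM (what is proved, stated in full; the proofs are below) =====
def Claim_equal_antenati_py : Prop := ∀ (y : Int) (tree : List (String × List String)) (children : List String) (new_tree : List (String × Int)) (val : Int), Dom_antenati_py y tree children new_tree val → Pre_antenati_py y tree children new_tree val → Spec_antenati_py y tree children new_tree val (antenati_py y tree children new_tree val)

-- ===== LEMMAS AND PROOFS =====
lemma pvAntB_nil (y : Int) (tree : PySem.Dict String (List String)) (f : Nat) (nt : PySem.Dict String Int) :
    pvAntB y tree f [] nt = nt := by rw [pvAntB.eq_def]

-- out of fuel, the stack machine stops at once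
lemma pvAntB_zero (y : Int) (tree : PySem.Dict String (List String)) (st : List (List String × Int)) (nt : PySem.Dict String Int) :
    pvAntB y tree 0 st nt = nt := by
  induction st with
  | nil => rw [pvAntB.eq_def]
  | cons fr st ih =>
    obtain ⟨cs, v⟩ := fr
    cases cs with
    | nil => rw [pvAntB.eq_def]; exact ih
    | cons c rest => rw [pvAntB.eq_def]

-- A's recursion never creates fuel: the leftover fuel is at most the fuel supplied
lemma pvAntA_fuel_le (y : Int) (tree : PySem.Dict String (List String)) (f : Nat) :
    ∀ (cs : List String) (nt : PySem.Dict String Int) (v : Int), (pvAntA y tree f cs nt v).2 ≤ f := by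
  induction f using Nat.strong_induction_on with
  | _ f ihf =>
    intro cs nt v
    match f, cs with
    | 0, _ => rw [pvAntA.eq_def]
    | f + 1, [] => rw [pvAntA.eq_def]
    | f + 1, c :: rest =>
      rw [pvAntA.eq_def]
      simp only []
      split_ifs with h1 h2
      · have h := ihf (min (pvAntA y tree f ((tree.get? c).getD []) (nt.insert c v) (v + 1)).2 f) (by omega) rest (pvAntA y tree f ((tree.get? c).getD []) (nt.insert c v) (v + 1)).1 v
        omega
      · have h := ihf (min (pvAntA y tree f ((tree.get? c).getD []) (nt.insert c v) v).2 f) (by omega) rest (pvAntA y tree f ((tree.get? c).getD []) (nt.insert c v) v).1 v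
        omega
      · have h := ihf f (by omega) rest (nt.insert c v) v
        omega

-- the stack machine run from ((cs, v) :: st) first computes A's recursion on (cs, v),
-- then continues with the rest of the stack on the leftover fuel
lemma pvAnt_sim (y : Int) (tree : PySem.Dict String (List String)) (f : Nat) :
    ∀ (cs : List String) (nt : PySem.Dict String Int) (v : Int) (st : List (List String × Int)),
      pvAntB y tree f ((cs, v) :: st) nt
        = pvAntB y tree (pvAntA y tree f cs nt v).2 st (pvAntA y tree f cs nt v).1 := by
  induction f using Nat.strong_induction_on with
  | _ f ihf =>
    intro cs nt v st
    match f, cs with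
    | 0, [] => rw [pvAntB.eq_def]; rw [pvAntA.eq_def]
    | 0, c :: rest => rw [pvAntB.eq_def]; rw [pvAntA.eq_def]; rw [pvAntB_zero]
    | f + 1, [] => rw [pvAntB.eq_def]; rw [pvAntA.eq_def]
    | f + 1, c :: rest =>
      rw [pvAntB.eq_def]
      conv_rhs => rw [pvAntA.eq_def]
      simp only []
      split_ifs with h1 h2
      · rw [ihf f (by omega)]
        have hle := pvAntA_fuel_le y tree f ((tree.get? c).getD []) (nt.insert c v) (v + 1)
        rw [ihf (pvAntA y tree f ((tree.get? c).getD []) (nt.insert c v) (v + 1)).2 (by omega)]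
        rw [min_eq_left hle]
      · rw [ihf f (by omega)]
        have hle := pvAntA_fuel_le y tree f ((tree.get? c).getD []) (nt.insert c v) v
        rw [ihf (pvAntA y tree f ((tree.get? c).getD []) (nt.insert c v) v).2 (by omega)]
        rw [min_eq_left hle]
      · rw [ihf f (by omega)]

-- ===== VERDICT (by name: the statement is the Claim_ definition above) =====
theorem antenati_py_spec : Claim_equal_antenati_py := by
  intro y tree children new_tree val _ _
  unfold Spec_antenati_py antenati_py antenati_py_alt
  rw [pvAnt_sim, pvAntB_nil]
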